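-- pv_equiv track=rewrite | github.com/JeremyF-141592/CoEvolution | IPCA/IPCA_core.py | xdominates
-- ===== SOURCE A (Python) =====
-- def xdominates(a, b):
--     """Return true if a strictly dominate b, except when a is all true"""
--     all_true = True
--     for i in range(len(a)):
--         if not a[i] and b[i]:
--             return False
--         all_true = all_true and a[i]
--     if all_true:
--         return False
--     return True
-- ===== SOURCE B (Python) =====
-- def xdominates(a, b):
--     # Positions where a fails; a is all-true iff there are none (then the
--     # exception rule applies).  Otherwise a dominates b iff b is false at
--     # every position where a is false.
--     fails = [i for i in range(len(a)) if not a[i]]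
--     if not fails:
--         return False
--     return not any(b[i] for i in fails)
-- ===== Notes on version B (the rewrite author's own statement) =====
-- stated objective: alternative
-- what changed: Replaces A's single fused loop with accumulator and early returns by a staged index-set computation: first collect the positions where a is False (a-only pass), return False if there are none (all-true case), otherwise answer not-any(b at those positions); b is consulted only at a's failure positions.
import Mathlib
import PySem

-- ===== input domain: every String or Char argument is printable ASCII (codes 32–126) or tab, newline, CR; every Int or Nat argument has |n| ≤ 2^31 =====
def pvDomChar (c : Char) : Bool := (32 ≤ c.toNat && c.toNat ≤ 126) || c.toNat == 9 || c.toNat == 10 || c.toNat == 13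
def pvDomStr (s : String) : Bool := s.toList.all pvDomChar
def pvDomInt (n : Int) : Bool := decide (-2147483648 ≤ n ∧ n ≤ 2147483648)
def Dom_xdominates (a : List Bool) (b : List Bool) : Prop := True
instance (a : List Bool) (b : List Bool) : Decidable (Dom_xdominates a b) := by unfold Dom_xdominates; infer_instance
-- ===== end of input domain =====

-- B replaces A's fused accumulator loop by a staged computation: collect a's failure
-- positions, then check b only there (alternative decomposition, same cost).


-- ===== PORT A =====
-- Loop over i in range(len(a)) with the all_true accumulator and early returns.
-- a[i] is always in range here; b[i] is exact via getD under Pre_ (out of range = Python IndexError, excluded).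
def xdominatesGo (a : List Bool) (b : List Bool) (i : Nat) (all_true : Bool) : Bool :=
  if _h : i < a.length then
    let ai := a.getD i false
    if !ai && b.getD i false then false
    else xdominatesGo a b (i + 1) (all_true && ai)
  else if all_true then false else true
termination_by a.length - i

def xdominates (a : List Bool) (b : List Bool) : Bool :=
  xdominatesGo a b 0 true

-- ===== PORT B =====
-- fails = [i for i in range(len(a)) if not a[i]]; if not fails: return False;
-- return not any(b[i] for i in fails)    (b accessed only at fail positions; exact under Pre_)
def xdominates_alt (a : List Bool) (b : List Bool) : Bool :=
  let fails := (List.range a.length).filter (fun i => !(a.getD i false))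
  if fails.isEmpty then false
  else !(fails.any (fun i => b.getD i false))

-- ===== PRECONDITION & SPEC =====
-- Pre_ excludes exactly the inputs on which the Python A (and B) raises IndexError:
-- b is accessed at an index i with a[i] false and i ≥ len(b), every earlier access returning False.
def Pre_xdominates (a : List Bool) (b : List Bool) : Prop :=
  ¬ ∃ i ∈ List.range a.length,
      b.length ≤ i ∧ a.getD i true = false ∧
      ∀ j ∈ List.range i, (a.getD j false || !(b.getD j false)) = true
instance (a : List Bool) (b : List Bool) : Decidable (Pre_xdominates a b) := by
  unfold Pre_xdominates; infer_instance

def pvWitness_xdominates : List Bool × List Bool := ([true, false], [false, true])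

def Spec_xdominates (a : List Bool) (b : List Bool) (out : Bool) : Prop := out = xdominates_alt a b
instance (a : List Bool) (b : List Bool) (out : Bool) : Decidable (Spec_xdominates a b out) := by
  unfold Spec_xdominates; infer_instance

-- ===== CLAIM (what is proved, stated in full; the proofs are below) =====
def Claim_equal_xdominates : Prop := ∀ (a : List Bool) (b : List Bool), Dom_xdominates a b → Pre_xdominates a b → Spec_xdominates a b (xdominates a b)

-- ===== LEMMAS AND PROOFS =====

-- Characterisation of A's loop: from position i with accumulator acc, it returns
-- (the remaining prefix is not all-true given acc) AND (domination holds on the remaining indices).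
theorem xdominatesGo_eq (a b : List Bool) :
    ∀ i acc, xdominatesGo a b i acc =
      (!(acc && (List.range' i (a.length - i)).all (fun j => a.getD j false)) &&
        (List.range' i (a.length - i)).all (fun j => a.getD j false || !(b.getD j false))) := by
  intro i acc
  induction' h : a.length - i with n ih generalizing i acc
  · rw [xdominatesGo]
    have hi : ¬ i < a.length := by omega
    simp only [hi, dite_false, List.range', List.all_nil, Bool.and_true]
    cases acc <;> simp
  · rw [xdominatesGo]
    have hi : i < a.length := by omega
    have h' : a.length - (i + 1) = n := by omega
    have IH := ih (i + 1) (acc && a.getD i false) h'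
    simp only [hi, dite_true, List.range', List.all_cons]
    rw [IH]
    cases hA : a.getD i false <;> cases hB : b.getD i false <;> cases acc <;> simp

-- Characterisation of B: fails-empty test = a all-true; not-any over fails = domination.
theorem xdominates_alt_eq (a b : List Bool) :
    xdominates_alt a b =
      (!(List.range a.length).all (fun j => a.getD j false) &&
        (List.range a.length).all (fun j => a.getD j false || !(b.getD j false))) := by
  unfold xdominates_alt
  simp only [List.any_filter, List.isEmpty_iff, List.filter_eq_nil_iff]
  split_ifs with h
  · have h1 : (List.range a.length).all (fun j => a.getD j false) = true := by
      simp only [List.all_eq_true]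
      intro j hj; have := h j hj; simpa using this
    rw [h1]; rfl
  · have h1 : (List.range a.length).all (fun j => a.getD j false) = false := by
      simp only [List.all_eq_false]
      push_neg at h
      obtain ⟨i, hi, hx⟩ := h
      exact ⟨i, hi, by simpa using hx⟩
    have hfun : (fun i => !a.getD i false && b.getD i false)
        = (fun x => !(a.getD x false || !(b.getD x false))) := by
      funext j; cases a.getD j false <;> cases b.getD j false <;> rfl
    rw [h1, Bool.not_false, Bool.true_and, List.all_eq_not_any_not, hfun]

-- ===== VERDICT (by name: the statement is the Claim_ definition above) =====
theorem xdominates_spec : Claim_equal_xdominates := by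
  intro a b _ _
  unfold Spec_xdominates xdominates
  rw [xdominatesGo_eq, xdominates_alt_eq]
  simp only [Nat.sub_zero, ← List.range_eq_range', Bool.true_and]
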